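-- pv_equiv track=rewrite | github.com/AtsushiSakai/PyMarkdownTOCgen | pymarkdowntocgen.py | build_final_contenst
-- ===== SOURCE A (Python) =====
-- TOC_HEADER_NUMBER = 2
--
-- def build_final_contenst(contents, tocstr):
--
--     final_contents = ""
--     add_toc = False
--     header = 0
--     for line in contents.split("\n"):
--
--         if len(line) <= 0:
--             continue
--
--         if line[0] == "#":
--             header += 1
--
--         if header == TOC_HEADER_NUMBER:
--             if not add_toc:
--                 final_contents += tocstr
--                 add_toc = True
--         else:
--             final_contents += line + "\n"
--
--     if not add_toc:
--         final_contents += tocstr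
--
--     return final_contents
-- ===== SOURCE B (Python) =====
-- def build_final_contenst(contents, tocstr):
--     lines = [l for l in contents.split("\n") if len(l) > 0]
--     hi = [i for i, l in enumerate(lines) if l[0] == "#"]
--     i2 = hi[1] if len(hi) >= 2 else len(lines)
--     i3 = hi[2] if len(hi) >= 3 else len(lines)
--     head = "".join(l + "\n" for l in lines[:i2])
--     tail = "".join(l + "\n" for l in lines[i3:])
--     return head + tocstr + tail
-- ===== Notes on version B (the rewrite author's own statement) =====
-- stated objective: alternative
-- what changed: Replaces A's single pass with a running add_toc flag and header counter by an index-first assembly: filter the non-empty lines once, locate the indices of the 2nd and 3rd header lines, and build the result as join(lines[:i2]) + tocstr + join(lines[i3:]).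
import Mathlib
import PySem

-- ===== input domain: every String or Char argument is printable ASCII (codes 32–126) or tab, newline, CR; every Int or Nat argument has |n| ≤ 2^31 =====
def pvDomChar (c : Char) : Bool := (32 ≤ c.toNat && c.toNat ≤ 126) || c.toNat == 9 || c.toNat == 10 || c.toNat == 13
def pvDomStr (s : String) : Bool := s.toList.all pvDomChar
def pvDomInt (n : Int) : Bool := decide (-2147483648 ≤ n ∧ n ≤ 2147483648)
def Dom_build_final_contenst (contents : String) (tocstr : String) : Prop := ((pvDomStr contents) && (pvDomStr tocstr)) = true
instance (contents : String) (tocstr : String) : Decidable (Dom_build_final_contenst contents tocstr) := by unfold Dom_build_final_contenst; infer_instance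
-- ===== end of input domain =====

-- B replaces A's running-flag single pass by an index-first slice-and-join assembly; same cost, different decomposition.

-- ===== PORT A =====
def TOC_HEADER_NUMBER : Int := 2

-- line[0] == "#"  (both Pythons test exactly this on a non-empty line)
def pyIsHash (l : String) : Bool := PySem.Str.pyGet? l 0 == some '#'

-- the body of A's for-loop: state = (final_contents, add_toc, header)
def stepA (tocstr : String) (st : String × Bool × Int) (line : String) : String × Bool × Int :=
  if PySem.Str.len line ≤ 0 then st            -- continue
  else
    let header := if pyIsHash line then st.2.2 + 1 else st.2.2
    if header == TOC_HEADER_NUMBER then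
      if st.2.1 = false then (st.1 ++ tocstr, true, header) else (st.1, st.2.1, header)
    else (st.1 ++ (line ++ "\n"), st.2.1, header)

def build_final_contenst (contents : String) (tocstr : String) : String :=
  -- contents.split("\n"): split? is some because the separator is non-empty
  let r := ((PySem.Str.split? contents "\n").getD []).foldl (stepA tocstr) ("", false, 0)
  if r.2.1 = false then r.1 ++ tocstr else r.1

-- ===== PORT B =====
def build_final_contenst_alt (contents : String) (tocstr : String) : String :=
  let lines := ((PySem.Str.split? contents "\n").getD []).filter (fun l => PySem.Str.len l > 0)
  let hi := (PySem.List.enumerate lines).filterMap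
    (fun il => if pyIsHash il.2 then some il.1 else none)
  let i2 := (hi[1]?).getD (PySem.List.len lines)
  let i3 := (hi[2]?).getD (PySem.List.len lines)
  let head := PySem.Str.join "" ((PySem.List.slice lines none (some i2)).map (fun l => l ++ "\n"))
  let tail := PySem.Str.join "" ((PySem.List.slice lines (some i3) none).map (fun l => l ++ "\n"))
  head ++ tocstr ++ tail

-- ===== PRECONDITION & SPEC =====
def Spec_build_final_contenst (contents : String) (tocstr : String) (out : String) : Prop := out = build_final_contenst_alt contents tocstr
instance (contents : String) (tocstr : String) (out : String) : Decidable (Spec_build_final_contenst contents tocstr out) := by unfold Spec_build_final_contenst; infer_instance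

-- ===== CLAIM (what is proved, stated in full; the proofs are below) =====
def Claim_equal_build_final_contenst : Prop := ∀ (contents : String) (tocstr : String), Dom_build_final_contenst contents tocstr → Spec_build_final_contenst contents tocstr (build_final_contenst contents tocstr)

-- ===== LEMMAS AND PROOFS =====

-- concatenation of lines, each with its "\n"
def jn (xs : List String) : String := PySem.Str.join "" (xs.map (fun l => l ++ "\n"))

-- index of the k-th (1-based) '#'-line, or the length of the list if there is none
def idxH : Nat → List String → Nat
  | _, [] => 0
  | k, l :: ls => if pyIsHash l then (if k = 1 then 0 else idxH (k-1) ls + 1) else idxH k ls + 1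

-- A's fold followed by its final toc check
def runA (tocstr : String) (st : String × Bool × Int) (ls : List String) : String :=
  let r := ls.foldl (stepA tocstr) st
  if r.2.1 = false then r.1 ++ tocstr else r.1

theorem jn_nil : jn [] = "" := by
  simp [jn, PySem.Str.join, PySem.Chars.join_nil]

theorem jn_cons (l : String) (xs : List String) : jn (l :: xs) = l ++ ("\n" ++ jn xs) := by
  apply String.toList_inj.mp
  cases xs <;> simp [jn, PySem.Str.join, PySem.Chars.join_cons_cons, PySem.Chars.join_singleton]

theorem str_length_pos (l : String) (h : l ≠ "") : 0 < l.length := by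
  have h1 : l.toList ≠ [] := by
    intro hh; exact h (String.toList_inj.mp (by simp [hh]))
  simpa using List.length_pos_of_ne_nil h1

theorem stepA_empty (toc : String) (st : String × Bool × Int) : stepA toc st "" = st := by
  simp [stepA]

theorem foldl_filter (toc : String) (xs : List String) (st : String × Bool × Int) :
    xs.foldl (stepA toc) st = (xs.filter (fun l => PySem.Str.len l > 0)).foldl (stepA toc) st := by
  induction xs generalizing st with
  | nil => rfl
  | cons l xs ih =>
    by_cases h : l = ""
    · subst h
      simp [List.foldl_cons, stepA_empty, ih]
    · have hp : 0 < l.toList.length := by simpa using str_length_pos l h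
      simp [List.foldl_cons, str_length_pos l h, ih]

theorem runA_phase3 (toc : String) (ls : List String) (acc : String) (h : Int)
    (h3 : 3 ≤ h) (hne : ∀ l ∈ ls, l ≠ "") :
    runA toc (acc, true, h) ls = acc ++ jn ls := by
  induction ls generalizing acc h with
  | nil => apply String.toList_inj.mp; simp [runA, jn_nil]
  | cons l ls ih =>
    have hl := hne l (by simp)
    have hrest : ∀ x ∈ ls, x ≠ "" := fun x hx => hne x (by simp [hx])
    by_cases hH : pyIsHash l
    · have : runA toc (acc, true, h) (l :: ls) = runA toc (acc ++ (l ++ "\n"), true, h + 1) ls := by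
        simp [runA, List.foldl_cons, stepA, hl, hH, TOC_HEADER_NUMBER,
          show ¬(h + 1 = (2:Int)) by omega]
      rw [this, ih _ _ (by omega) hrest, jn_cons]
      apply String.toList_inj.mp; simp
    · have : runA toc (acc, true, h) (l :: ls) = runA toc (acc ++ (l ++ "\n"), true, h) ls := by
        simp [runA, List.foldl_cons, stepA, hl, hH, TOC_HEADER_NUMBER,
          show ¬(h = (2:Int)) by omega]
      rw [this, ih _ _ h3 hrest, jn_cons]
      apply String.toList_inj.mp; simp

theorem runA_phase2 (toc : String) (ls : List String) (acc : String)
    (hne : ∀ l ∈ ls, l ≠ "") :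
    runA toc (acc, true, 2) ls = acc ++ jn (ls.drop (idxH 1 ls)) := by
  induction ls generalizing acc with
  | nil => apply String.toList_inj.mp; simp [runA, jn_nil]
  | cons l ls ih =>
    have hl := hne l (by simp)
    have hrest : ∀ x ∈ ls, x ≠ "" := fun x hx => hne x (by simp [hx])
    by_cases hH : pyIsHash l
    · have : runA toc (acc, true, 2) (l :: ls) = runA toc (acc ++ (l ++ "\n"), true, 3) ls := by
        simp [runA, List.foldl_cons, stepA, hl, hH, TOC_HEADER_NUMBER]
      rw [this, runA_phase3 toc ls _ 3 (by omega) hrest]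
      simp only [idxH, hH, if_pos, List.drop_zero, jn_cons]
      apply String.toList_inj.mp; simp
    · have : runA toc (acc, true, 2) (l :: ls) = runA toc (acc, true, 2) ls := by
        simp [runA, List.foldl_cons, stepA, hl, hH, TOC_HEADER_NUMBER]
      rw [this, ih _ hrest]
      simp [idxH, hH]

theorem runA_phase1 (toc : String) (ls : List String) (acc : String)
    (hne : ∀ l ∈ ls, l ≠ "") :
    runA toc (acc, false, 1) ls
      = acc ++ (jn (ls.take (idxH 1 ls)) ++ (toc ++ jn (ls.drop (idxH 2 ls)))) := by
  induction ls generalizing acc with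
  | nil =>
    apply String.toList_inj.mp; simp [runA, jn_nil, idxH]
  | cons l ls ih =>
    have hl := hne l (by simp)
    have hrest : ∀ x ∈ ls, x ≠ "" := fun x hx => hne x (by simp [hx])
    by_cases hH : pyIsHash l
    · have : runA toc (acc, false, 1) (l :: ls) = runA toc (acc ++ toc, true, 2) ls := by
        simp [runA, List.foldl_cons, stepA, hl, hH, TOC_HEADER_NUMBER]
      rw [this, runA_phase2 toc ls _ hrest]
      simp only [idxH, hH, if_pos, List.take_zero]
      rw [jn_nil]
      apply String.toList_inj.mp; simp
    · have : runA toc (acc, false, 1) (l :: ls) = runA toc (acc ++ (l ++ "\n"), false, 1) ls := by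
        simp [runA, List.foldl_cons, stepA, hl, hH, TOC_HEADER_NUMBER]
      rw [this, ih _ hrest]
      simp only [idxH, hH, Bool.false_eq_true, if_false, List.take_succ_cons, List.drop_succ_cons, jn_cons]
      apply String.toList_inj.mp; simp

theorem runA_phase0 (toc : String) (ls : List String) (acc : String)
    (hne : ∀ l ∈ ls, l ≠ "") :
    runA toc (acc, false, 0) ls
      = acc ++ (jn (ls.take (idxH 2 ls)) ++ (toc ++ jn (ls.drop (idxH 3 ls)))) := by
  induction ls generalizing acc with
  | nil =>
    apply String.toList_inj.mp; simp [runA, jn_nil, idxH]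
  | cons l ls ih =>
    have hl := hne l (by simp)
    have hrest : ∀ x ∈ ls, x ≠ "" := fun x hx => hne x (by simp [hx])
    by_cases hH : pyIsHash l
    · have : runA toc (acc, false, 0) (l :: ls) = runA toc (acc ++ (l ++ "\n"), false, 1) ls := by
        simp [runA, List.foldl_cons, stepA, hl, hH, TOC_HEADER_NUMBER]
      rw [this, runA_phase1 toc ls _ hrest]
      have h2 : idxH 2 (l :: ls) = idxH 1 ls + 1 := by simp [idxH, hH]
      have h3 : idxH 3 (l :: ls) = idxH 2 ls + 1 := by simp [idxH, hH]
      rw [h2, h3, List.take_succ_cons, List.drop_succ_cons, jn_cons]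
      apply String.toList_inj.mp; simp
    · have : runA toc (acc, false, 0) (l :: ls) = runA toc (acc ++ (l ++ "\n"), false, 0) ls := by
        simp [runA, List.foldl_cons, stepA, hl, hH, TOC_HEADER_NUMBER]
      rw [this, ih _ hrest]
      simp only [idxH, hH, Bool.false_eq_true, if_false, List.take_succ_cons, List.drop_succ_cons, jn_cons]
      apply String.toList_inj.mp; simp

theorem hi_getD (ls : List String) (s : Int) (k : Nat) :
    ((((PySem.List.enumerate ls s).filterMap
        (fun il => if pyIsHash il.2 then some il.1 else none))[k]?).getD (s + ls.length))
      = s + (idxH (k+1) ls : Int) := by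
  induction ls generalizing s k with
  | nil => simp [PySem.List.enumerate_nil, idxH]
  | cons l ls ih =>
    rw [PySem.List.enumerate_cons]
    by_cases hH : pyIsHash l
    · cases k with
      | zero => simp [hH, idxH]
      | succ k =>
        have h := ih (s+1) k
        simp only [List.filterMap_cons, hH, if_pos, List.getElem?_cons_succ]
        rw [show (s + (((l :: ls).length : Nat) : Int)) = (s+1) + (ls.length : Int) by simp; ring, h]
        simp [idxH, hH]; ring
    · have h := ih (s+1) k
      simp only [List.filterMap_cons, hH, Bool.false_eq_true, if_false]
      rw [show (s + (((l :: ls).length : Nat) : Int)) = (s+1) + (ls.length : Int) by simp; ring, h]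
      simp [idxH, hH]; ring

theorem build_final_contenst_eq (contents tocstr : String) :
    build_final_contenst contents tocstr = build_final_contenst_alt contents tocstr := by
  unfold build_final_contenst build_final_contenst_alt
  set xs := (PySem.Str.split? contents "\n").getD [] with hxs
  set ls := xs.filter (fun l => PySem.Str.len l > 0) with hls
  have hne : ∀ l ∈ ls, l ≠ "" := by
    intro l hl hcon
    have h1 := List.of_mem_filter hl
    subst hcon
    simp at h1
  have hA : (if ((xs.foldl (stepA tocstr) ("", false, 0)).2.1 = false)
        then (xs.foldl (stepA tocstr) ("", false, 0)).1 ++ tocstr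
        else (xs.foldl (stepA tocstr) ("", false, 0)).1)
      = runA tocstr ("", false, 0) ls := by
    rw [runA, foldl_filter tocstr xs ("", false, 0)]
  simp only [hA, runA_phase0 tocstr ls "" hne]
  have h2 := hi_getD ls 0 1
  have h3 := hi_getD ls 0 2
  simp only [zero_add] at h2 h3
  rw [show PySem.List.len ls = ((ls.length : Nat) : Int) from PySem.List.len_eq ls]
  rw [h2, h3, PySem.List.slice_to_natCast, PySem.List.slice_from_natCast]
  apply String.toList_inj.mp
  simp [jn]

-- ===== VERDICT (by name: the statement is the Claim_ definition above) =====
theorem build_final_contenst_spec : Claim_equal_build_final_contenst := by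
  intro contents tocstr _
  unfold Spec_build_final_contenst
  exact build_final_contenst_eq contents tocstr
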